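-- pv_equiv track=rewrite | github.com/kshitijgorde/PhishingURLDetectionUsingOversampling | FeatureCSV.py | countPunctuation
-- ===== SOURCE A (Python) =====
-- def countPunctuation(URL):
--     'Counts certain punctuation marks'
--     punctuationFeature = '0'
--     blacklistedPunctuations = ['!','#','$','*',';',':','\'']
--     count = 0
--     for everPunctuation in blacklistedPunctuations:
--         if everPunctuation in URL:
--             count+=1
--     if count > 1:
--         punctuationFeature = '1'
--
--     return punctuationFeature
-- ===== SOURCE B (Python) =====
-- def countPunctuation(URL):
--     'Counts certain punctuation marks'
--     blacklist = {'!', '#', '$', '*', ';', ':', '\''}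
--     seen = set()
--     for ch in URL:
--         if ch in blacklist:
--             seen.add(ch)
--     return '1' if len(seen) > 1 else '0'
-- ===== Notes on version B (the rewrite author's own statement) =====
-- stated objective: idiomatic
-- what changed: Inverted the traversal: instead of looping over the seven blacklisted marks and substring-testing each against the URL with an int counter, B makes a single pass over the URL's characters collecting blacklisted marks into a set and checks whether more than one distinct mark was seen.
import Mathlib
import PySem

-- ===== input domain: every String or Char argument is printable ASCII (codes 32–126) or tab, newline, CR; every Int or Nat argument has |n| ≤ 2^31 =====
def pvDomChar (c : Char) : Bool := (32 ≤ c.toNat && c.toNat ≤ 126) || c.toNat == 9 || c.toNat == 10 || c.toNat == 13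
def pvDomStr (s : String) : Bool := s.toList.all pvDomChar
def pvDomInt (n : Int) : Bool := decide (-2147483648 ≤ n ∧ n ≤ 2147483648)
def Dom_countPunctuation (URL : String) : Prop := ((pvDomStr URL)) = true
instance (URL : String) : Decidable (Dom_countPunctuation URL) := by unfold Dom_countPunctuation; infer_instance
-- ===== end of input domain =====

-- B inverts the traversal: one pass over the URL collecting blacklisted marks into a set (idiomatic; A loops over the blacklist with substring tests and a counter).

-- ===== PORT A =====
-- A loops over the seven blacklisted single-character strings, testing each as a substring of URL ('everPunctuation in URL').
def countPunctuation (URL : String) : String :=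
  let blacklistedPunctuations : List String := ["!", "#", "$", "*", ";", ":", "'"]
  let count : Int :=
    blacklistedPunctuations.foldl
      (fun count p => if PySem.Str.isIn p URL then count + 1 else count) 0
  if count > 1 then "1" else "0"

-- ===== PORT B =====
def countPunctuation_alt (URL : String) : String :=
  let blacklist : PySem.Set Char := PySem.Set.ofList ['!', '#', '$', '*', ';', ':', '\'']
  let seen : PySem.Set Char :=
    URL.toList.foldl
      (fun seen ch => if PySem.Set.contains blacklist ch then PySem.Set.add seen ch else seen)
      PySem.Set.empty
  if PySem.Set.len seen > 1 then "1" else "0"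

-- ===== PRECONDITION & SPEC =====
def Spec_countPunctuation (URL : String) (out : String) : Prop := out = countPunctuation_alt URL
instance (URL : String) (out : String) : Decidable (Spec_countPunctuation URL out) := by unfold Spec_countPunctuation; infer_instance

-- ===== CLAIM (what is proved, stated in full; the proofs are below) =====
def Claim_equal_countPunctuation : Prop := ∀ (URL : String), Dom_countPunctuation URL → Spec_countPunctuation URL (countPunctuation URL)

-- ===== LEMMAS AND PROOFS =====

-- A's counting fold = length of the filtered list.
theorem foldl_count {σ : Type} (bl : List σ) (q : σ → Bool) (acc : Int) :
    bl.foldl (fun count p => if q p then count + 1 else count) acc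
      = acc + (bl.filter q).length := by
  induction bl generalizing acc with
  | nil => simp
  | cons p bl ih =>
    rw [List.foldl_cons, ih]
    by_cases h : q p
    · rw [if_pos h]
      simp only [List.filter_cons, h, if_true, List.length_cons]
      push_cast
      ring
    · rw [if_neg h]
      simp only [List.filter_cons, h, if_false, Bool.false_eq_true]

-- B's collecting fold = folding Set.add over the filtered characters, from any seed.
theorem foldB_eq_filter (cs : List Char) (bl s : PySem.Set Char) :
    cs.foldl (fun seen ch => if PySem.Set.contains bl ch then PySem.Set.add seen ch else seen) s
      = (cs.filter (fun ch => PySem.Set.contains bl ch)).foldl PySem.Set.add s := by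
  induction cs generalizing s with
  | nil => rfl
  | cons c cs ih =>
    rw [List.foldl_cons, ih]
    by_cases h : PySem.Set.contains bl c
    · rw [if_pos h]
      simp only [List.filter_cons, h, if_true, List.foldl_cons]
    · rw [if_neg h]
      simp only [List.filter_cons, h, if_false, Bool.false_eq_true]

-- Python's 'c in s' for a one-character pattern = character membership.
theorem chars_isIn_one (cs : List Char) (c : Char) :
    PySem.Chars.isIn [c] cs = cs.contains c := by
  by_cases h : c ∈ cs
  · obtain ⟨l, r, h2⟩ := List.append_of_mem h
    have hinf : [c] <:+: cs := ⟨l, r, by rw [h2]; simp⟩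
    rw [(PySem.Chars.isIn_iff_infix _ _).2 hinf]
    simp [h]
  · have hninf : ¬ ([c] <:+: cs) := fun hin => h (hin.subset (by simp))
    have hf : PySem.Chars.isIn [c] cs = false := by
      rw [← Bool.not_eq_true, PySem.Chars.isIn_iff_infix _ _]; exact hninf
    rw [hf]
    simp [h]

theorem isIn_one (s p : String) (c : Char) (hp : p.toList = [c]) :
    PySem.Str.isIn p s = s.toList.contains c := by
  rw [PySem.Str.isIn_eq, hp, chars_isIn_one]

-- Two nodup lists with the same members have the same length.
theorem nodup_length_eq {α : Type} [DecidableEq α] (l₁ l₂ : List α)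
    (h₁ : l₁.Nodup) (h₂ : l₂.Nodup) (hm : ∀ x, x ∈ l₁ ↔ x ∈ l₂) :
    l₁.length = l₂.length := by
  rw [← List.toFinset_card_of_nodup h₁, ← List.toFinset_card_of_nodup h₂]
  congr 1
  ext x
  simp [hm]

theorem toList_lit :
    "!".toList = ['!'] ∧ "#".toList = ['#'] ∧ "$".toList = ['$'] ∧ "*".toList = ['*'] ∧
    ";".toList = [';'] ∧ ":".toList = [':'] ∧ "'".toList = ['\''] := by
  refine ⟨by simp, by simp, by simp, by simp, by simp, by simp, by simp⟩

set_option maxHeartbeats 1600000 in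
theorem countPunctuation_eq_alt (URL : String) :
    countPunctuation URL = countPunctuation_alt URL := by
  unfold countPunctuation countPunctuation_alt
  dsimp only
  rw [foldl_count, foldB_eq_filter]
  have hbl : (PySem.Set.ofList ['!', '#', '$', '*', ';', ':', '\''] : PySem.Set Char)
      = ['!', '#', '$', '*', ';', ':', '\''] := by decide
  rw [hbl]
  rw [show (URL.toList.filter (fun ch => PySem.Set.contains (['!', '#', '$', '*', ';', ':', '\''] : PySem.Set Char) ch)).foldl PySem.Set.add PySem.Set.empty
        = PySem.Set.ofList (URL.toList.filter (fun ch => PySem.Set.contains (['!', '#', '$', '*', ';', ':', '\''] : PySem.Set Char) ch))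
      from (PySem.Set.ofList_eq_foldl _).symm]
  rw [← PySem.List.dedup_eq_ofList]
  -- reduce the A-side filter over one-character strings to a filter over characters
  have hcnt :
      (List.filter (fun p => PySem.Str.isIn p URL) ["!", "#", "$", "*", ";", ":", "'"]).length
        = (List.filter (fun c => URL.toList.contains c) ['!', '#', '$', '*', ';', ':', '\'']).length := by
    rw [List.filter_cons, List.filter_cons, List.filter_cons, List.filter_cons,
      List.filter_cons, List.filter_cons, List.filter_cons, List.filter_nil,
      List.filter_cons, List.filter_cons, List.filter_cons, List.filter_cons,
      List.filter_cons, List.filter_cons, List.filter_cons, List.filter_nil,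
      isIn_one URL "!" '!' toList_lit.1, isIn_one URL "#" '#' toList_lit.2.1,
      isIn_one URL "$" '$' toList_lit.2.2.1, isIn_one URL "*" '*' toList_lit.2.2.2.1,
      isIn_one URL ";" ';' toList_lit.2.2.2.2.1, isIn_one URL ":" ':' toList_lit.2.2.2.2.2.1,
      isIn_one URL "'" '\'' toList_lit.2.2.2.2.2.2]
    split_ifs <;> rfl
  rw [hcnt]
  -- both sides now count the same set of characters
  have hlen :
      (List.filter (fun c => URL.toList.contains c) ['!', '#', '$', '*', ';', ':', '\'']).length
        = (PySem.List.dedup (URL.toList.filter (fun ch => PySem.Set.contains (['!', '#', '$', '*', ';', ':', '\''] : PySem.Set Char) ch))).length := by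
    apply nodup_length_eq
    · exact List.Nodup.filter _ (by decide)
    · exact PySem.List.nodup_dedup _
    · intro x
      simp only [List.mem_filter, PySem.List.mem_dedup, PySem.Set.contains,
        List.contains_eq_mem, decide_eq_true_eq]
      tauto
  rw [PySem.Set.len, hlen, zero_add]

-- ===== VERDICT (by name: the statement is the Claim_ definition above) =====
theorem countPunctuation_spec : Claim_equal_countPunctuation := by
  intro URL _
  unfold Spec_countPunctuation
  exact countPunctuation_eq_alt URL
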